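-- pv_equiv track=rewrite | github.com/kguzek/advent-of-code-2024 | src/puzzles/day_12/solution.py | get_region_data
-- ===== SOURCE A (Python) =====
-- class Region:
--     """A region of plots on the grid."""
--
--     def __init__(self, region_map: list[str], x: int, y: int):
--         self.type = region_map[y][x]
--         self.plots: set[tuple[int, int]] = set()
--         self.perimeter = 0
--         self.number_of_sides = 0
--         self._scan_plots(region_map, x, y)
--         self.simple_fence_cost = len(self.plots) * self.perimeter
--         self.bulk_fence_cost = len(self.plots) * self.number_of_sides
--
--     def contains_plot(self, x: int, y: int) -> bool:
--         """Checks if the region contains a plot at the given coordinates."""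
--         return (x, y) in self.plots
--
--     def _scan_plots(self, region_map: list[str], x: int, y: int) -> bool:
--         """Scans the plots around the base plot for plots belonging to the region.
--
--         Returns a tuple containing booleans indicating respectively if the plot is on the edge
--         of the region and if it is part of a new side."""
--         if not 0 <= x < len(region_map[0]) or not 0 <= y < len(region_map):
--             return True, False
--         if not region_map[y][x] == self.type:
--             return True, False
--         self.plots.add((x, y))
--         for delta_x, delta_y in ((0, -1), (1, 0), (0, 1), (-1, 0)):
--             # Needed to avoid infinite loops
--             if self.contains_plot(x + delta_x, y + delta_y):
--                 continue
--             is_at_edge, is_new_side = self._scan_plots(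
--                 region_map, x + delta_x, y + delta_y
--             )
--             if is_at_edge:
--                 self.perimeter += 1
--             if is_new_side:
--                 self.number_of_sides += 1
--         return False, False
--
-- def get_region_data(region_map: list[str]):
--     """Returns the regions in the region map."""
--     regions: set[Region] = set()
--     total_simple_cost = 0
--     total_bulk_cost = 0
--     height = len(region_map)
--     width = len(region_map[0])
--     for y in range(height):
--         for x in range(width):
--             if any(region.contains_plot(x, y) for region in regions):
--                 continue
--             region = Region(region_map, x, y)
--             regions.add(region)
--             total_simple_cost += region.simple_fence_cost
--             total_bulk_cost += region.bulk_fence_cost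
--     return total_simple_cost, total_bulk_cost
-- ===== SOURCE B (Python) =====
-- DELTAS = ((0, -1), (1, 0), (0, 1), (-1, 0))
--
--
-- def get_region_data(region_map: list[str]):
--     """Returns the regions in the region map."""
--     height = len(region_map)
--     width = len(region_map[0])
--     visited: set[tuple[int, int]] = set()
--     total_simple_cost = 0
--     for y in range(height):
--         for x in range(width):
--             if (x, y) in visited:
--                 continue
--             plot_type = region_map[y][x]
--             # iterative flood fill with an explicit stack
--             cells: set[tuple[int, int]] = set()
--             stack = [(x, y)]
--             while stack:
--                 cx, cy = stack.pop()
--                 if (cx, cy) in cells: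
--                     continue
--                 if not (0 <= cx < width and 0 <= cy < height):
--                     continue
--                 if region_map[cy][cx] != plot_type:
--                     continue
--                 cells.add((cx, cy))
--                 stack.extend((cx + dx, cy + dy) for dx, dy in DELTAS)
--             # perimeter in a separate pass: edges to out-of-bounds or other-type cells
--             perimeter = 0
--             for cx, cy in cells:
--                 for dx, dy in DELTAS:
--                     nx, ny = cx + dx, cy + dy
--                     if not (0 <= nx < width and 0 <= ny < height) or region_map[ny][nx] != plot_type:
--                         perimeter += 1
--             visited |= cells
--             total_simple_cost += len(cells) * perimeter
--     # the bulk (side-count) component of A never accumulates anything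
--     return total_simple_cost, 0
-- ===== Notes on version B (the rewrite author's own statement) =====
-- stated objective: simpler
-- what changed: Replaces A's Region class with recursive DFS (perimeter accumulated inside the recursion, plus an O(#regions) linear scan of all regions for every cell) by one global visited set, an iterative explicit-stack flood fill, and a separate per-cell neighbour-counting pass for the perimeter; the bulk cost is returned as the constant 0 that A's dead side-counting always yields.
import Mathlib
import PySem

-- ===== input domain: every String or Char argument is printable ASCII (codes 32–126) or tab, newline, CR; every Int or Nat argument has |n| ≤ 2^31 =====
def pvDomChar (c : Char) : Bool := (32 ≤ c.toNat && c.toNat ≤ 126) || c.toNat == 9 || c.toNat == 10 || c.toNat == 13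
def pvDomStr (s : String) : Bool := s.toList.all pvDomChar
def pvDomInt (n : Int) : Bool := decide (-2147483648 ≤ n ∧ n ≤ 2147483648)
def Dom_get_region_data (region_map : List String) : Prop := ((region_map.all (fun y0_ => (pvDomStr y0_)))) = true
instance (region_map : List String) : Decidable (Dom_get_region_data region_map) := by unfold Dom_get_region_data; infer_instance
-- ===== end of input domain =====

-- B replaces A's recursive flood fill with classes by one global visited set, an explicit-stack
-- iterative fill and a separate perimeter-counting pass (bulk cost is provably always 0 in A).

-- ===== PORT A =====
-- shared grid helpers (both ports read the map the same way)
def pvGrid (region_map : List String) : List (List Char) := region_map.map String.toList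
def pvW (g : List (List Char)) : Int := ((g.headD []).length : Int)   -- len(region_map[0]); Pre_ gives nonemptiness
def pvH (g : List (List Char)) : Int := (g.length : Int)
-- region_map[y][x]; only evaluated behind the bounds check, where (under Pre_) it is exact
def pvAt (g : List (List Char)) (x y : Int) : Char := ((PySem.List.pyGet? ((PySem.List.pyGet? g y).getD []) x).getD ' ')
def pvInB (W H x y : Int) : Bool := decide (0 ≤ x) && decide (x < W) && decide (0 ≤ y) && decide (y < H)
def pvDeltas : List (Int × Int) := [(0, -1), (1, 0), (0, 1), (-1, 0)]

structure RegSt where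
  plots : PySem.Set (Int × Int)
  perim : Int
  sides : Int

-- Region._scan_plots; fuel only makes the recursion total (grid-size fuel is never exhausted);
-- the 'for delta_x, delta_y in …' loop is the foldl over pvDeltas
def scanPlots (fuel : Nat) (g : List (List Char)) (ty : Char) (x y : Int) (st : RegSt) :
    (Bool × Bool) × RegSt :=
  match fuel with
  | 0 => ((true, false), st)
  | fuel + 1 =>
    if ¬ (pvInB (pvW g) (pvH g) x y = true) then ((true, false), st)
    else if ¬ (pvAt g x y = ty) then ((true, false), st)
    else
      ((false, false),
        pvDeltas.foldl (fun st d =>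
          if PySem.Set.contains st.plots (x + d.1, y + d.2) then st
          else
            let r := scanPlots fuel g ty (x + d.1) (y + d.2) st
            let st2 := if r.1.1 then { r.2 with perim := r.2.perim + 1 } else r.2
            if r.1.2 then { st2 with sides := st2.sides + 1 } else st2)
          { st with plots := PySem.Set.add st.plots (x, y) })

-- body of the nested 'for y … for x …' loop of A's get_region_data
def bodyA (g : List (List Char)) (acc : List (List (Int × Int)) × Int × Int) (x y : Int) :
    List (List (Int × Int)) × Int × Int :=
  if acc.1.any (fun R => PySem.Set.contains R (x, y)) then acc
  else
    let ty := pvAt g x y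
    let reg := (scanPlots ((pvW g).toNat * (pvH g).toNat + 1) g ty x y ⟨PySem.Set.empty, 0, 0⟩).2
    (reg.plots :: acc.1,
     acc.2.1 + (reg.plots.length : Int) * reg.perim,
     acc.2.2 + (reg.plots.length : Int) * reg.sides)

def get_region_data (region_map : List String) : Int × Int :=
  let g := pvGrid region_map
  let height := pvH g
  let width := pvW g
  let res := (PySem.List.pyRange 0 height 1).foldl (fun acc y =>
    (PySem.List.pyRange 0 width 1).foldl (fun acc x => bodyA g acc x y) acc) ([], 0, 0)
  (res.2.1, res.2.2)

-- ===== PORT B =====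
-- iterative flood fill with an explicit stack (stack head = top = end of the Python list)
def fillLoop (fuel : Nat) (g : List (List Char)) (ty : Char) (stack : List (Int × Int))
    (cells : PySem.Set (Int × Int)) : PySem.Set (Int × Int) :=
  match fuel, stack with
  | _, [] => cells
  | 0, _ => cells
  | fuel + 1, (cx, cy) :: rest =>
    if PySem.Set.contains cells (cx, cy) then fillLoop fuel g ty rest cells
    else if ¬ (pvInB (pvW g) (pvH g) cx cy = true) then fillLoop fuel g ty rest cells
    else if ¬ (pvAt g cx cy = ty) then fillLoop fuel g ty rest cells
    else fillLoop fuel g ty ((cx - 1, cy) :: (cx, cy + 1) :: (cx + 1, cy) :: (cx, cy - 1) :: rest)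
           (PySem.Set.add cells (cx, cy))

-- separate perimeter pass: neighbours that are out of bounds or of another type
def perimOf (g : List (List Char)) (ty : Char) (cells : List (Int × Int)) : Int :=
  cells.foldl (fun acc c =>
    pvDeltas.foldl (fun acc d =>
      if ¬ (pvInB (pvW g) (pvH g) (c.1 + d.1) (c.2 + d.2) = true) ∨ ¬ (pvAt g (c.1 + d.1) (c.2 + d.2) = ty)
      then acc + 1 else acc) acc) 0

def bodyB (g : List (List Char)) (acc : PySem.Set (Int × Int) × Int) (x y : Int) :
    PySem.Set (Int × Int) × Int :=
  if PySem.Set.contains acc.1 (x, y) then acc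
  else
    let ty := pvAt g x y
    let cells := fillLoop (4 * ((pvW g).toNat * (pvH g).toNat) + 1) g ty [(x, y)] PySem.Set.empty
    let p := perimOf g ty cells
    (PySem.Set.union acc.1 cells, acc.2 + (cells.length : Int) * p)

def get_region_data_alt (region_map : List String) : Int × Int :=
  let g := pvGrid region_map
  let height := pvH g
  let width := pvW g
  let res := (PySem.List.pyRange 0 height 1).foldl (fun acc y =>
    (PySem.List.pyRange 0 width 1).foldl (fun acc x => bodyB g acc x y) acc) ([], 0)
  (res.2, 0)

-- ===== PRECONDITION & SPEC =====
-- Pre_ excludes exactly the inputs where A raises IndexError: the empty map (len(region_map[0]))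
-- and maps with a row shorter than row 0 (region_map[y][x] on that row).  B raises there too.
def Pre_get_region_data (region_map : List String) : Prop :=
  region_map ≠ [] ∧ ∀ s ∈ region_map, (region_map.headD "").toList.length ≤ s.toList.length
instance (region_map : List String) : Decidable (Pre_get_region_data region_map) := by
  unfold Pre_get_region_data; infer_instance
def pvWitness_get_region_data : List String := ["AAB", "ABB", "CCC"]
def Spec_get_region_data (region_map : List String) (out : Int × Int) : Prop := out = get_region_data_alt region_map
instance (region_map : List String) (out : Int × Int) : Decidable (Spec_get_region_data region_map out) := by unfold Spec_get_region_data; infer_instance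

-- ===== CLAIM (what is proved, stated in full; the proofs are below) =====
def Claim_equal_get_region_data : Prop := ∀ (region_map : List String), Dom_get_region_data region_map → Pre_get_region_data region_map → Spec_get_region_data region_map (get_region_data region_map)

-- ===== LEMMAS AND PROOFS =====

-- a cell is good when it is in bounds and carries the region's type
def goodC (g : List (List Char)) (ty : Char) (c : Int × Int) : Bool :=
  pvInB (pvW g) (pvH g) c.1 c.2 && (pvAt g c.1 c.2 == ty)

def nbrsOf (c : Int × Int) : List (Int × Int) := pvDeltas.map (fun d => (c.1 + d.1, c.2 + d.2))

-- connectivity through good cells avoiding the set v (both endpoints good and outside v)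
inductive Conn (g : List (List Char)) (ty : Char) (v : List (Int × Int)) :
    (Int × Int) → (Int × Int) → Prop
  | refl (c : Int × Int) : goodC g ty c = true → c ∉ v → Conn g ty v c c
  | step {a b c : Int × Int} : Conn g ty v a b → c ∈ nbrsOf b → goodC g ty c = true → c ∉ v →
      Conn g ty v a c

def badC (g : List (List Char)) (ty : Char) (c : Int × Int) : Int :=
  ((nbrsOf c).map (fun n => if goodC g ty n = true then (0 : Int) else 1)).sum

def badSum (g : List (List Char)) (ty : Char) (l : List (Int × Int)) : Int :=
  (l.map (badC g ty)).sum

def allCells (g : List (List Char)) : List (Int × Int) :=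
  (List.range g.length).flatMap (fun (y : Nat) => (List.range (pvW g).toNat).map (fun (x : Nat) => ((x : Int), (y : Int))))

def freeN (g : List (List Char)) (pl : List (Int × Int)) : Nat :=
  ((allCells g).filter (fun c => decide (c ∉ pl))).length

def allGoodP (g : List (List Char)) (ty : Char) (pl : List (Int × Int)) : Prop :=
  ∀ c ∈ pl, goodC g ty c = true

lemma conn_good {g ty v a c} (h : Conn g ty v a c) : goodC g ty c = true ∧ c ∉ v := by
  induction h with
  | refl hg hv => exact ⟨hg, hv⟩
  | step _ _ hg hv _ => exact ⟨hg, hv⟩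

lemma conn_trans {g ty v a b c} (h1 : Conn g ty v a b) (h2 : Conn g ty v b c) :
    Conn g ty v a c := by
  induction h2 with
  | refl => exact h1
  | step _ hn hg hv ih => exact Conn.step ih hn hg hv

lemma conn_weaken {g ty v v' a c} (hsub : ∀ x ∈ v', x ∈ v) (h : Conn g ty v a c) :
    Conn g ty v' a c := by
  induction h with
  | refl hg hv => exact Conn.refl _ hg (fun hc => hv (hsub _ hc))
  | step _ hn hg hv ih => exact Conn.step ih hn hg (fun hc => hv (hsub _ hc))

lemma conn_complete {g ty v} {R : List (Int × Int)} {s : Int × Int}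
    (hcl : ∀ c ∈ R, c ∉ v → ∀ n ∈ nbrsOf c, goodC g ty n = true → n ∈ R)
    (hs : s ∈ R) : ∀ c, Conn g ty v s c → c ∈ R := by
  intro c h
  induction h with
  | refl => exact hs
  | step hab hn hg hv ih => exact hcl _ ih (conn_good hab).2 _ hn hg

lemma mem_allCells {g : List (List Char)} {c : Int × Int} :
    c ∈ allCells g ↔ pvInB (pvW g) (pvH g) c.1 c.2 = true := by
  obtain ⟨cx, cy⟩ := c
  constructor
  · intro h
    obtain ⟨y, hy, h2⟩ := List.mem_flatMap.1 h
    obtain ⟨x, hx, h3⟩ := List.mem_map.1 h2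
    simp only [Prod.mk.injEq] at h3
    obtain ⟨rfl, rfl⟩ := h3
    have hy' := List.mem_range.1 hy
    have hx' := List.mem_range.1 hx
    simp only [pvW, Int.toNat_natCast] at hx'
    simp only [pvInB, pvW, pvH, Bool.and_eq_true, decide_eq_true_eq]
    omega
  · intro h
    simp only [pvInB, pvW, pvH, Bool.and_eq_true, decide_eq_true_eq] at h
    refine List.mem_flatMap.2 ⟨cy.toNat, ?_, List.mem_map.2 ⟨cx.toNat, ?_, ?_⟩⟩
    · exact List.mem_range.2 (by omega)
    · exact List.mem_range.2 (by simp only [pvW, Int.toNat_natCast]; omega)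
    · simp only [Prod.mk.injEq]
      omega

lemma length_allCells (g : List (List Char)) :
    (allCells g).length = g.length * (pvW g).toNat := by
  simp [allCells, List.length_flatMap]

lemma filter_len_le {α : Type} (l : List α) (p q : α → Bool)
    (himp : ∀ a, q a = true → p a = true) :
    (l.filter q).length ≤ (l.filter p).length := by
  induction l with
  | nil => simp
  | cons a t ih =>
    simp only [List.filter_cons]
    by_cases hq : q a = true
    · simp only [hq, himp a hq, if_true, List.length_cons]
      omega
    · rw [if_neg hq]
      by_cases hp : p a = true
      · simp only [hp, if_true, List.length_cons]
        omega
      · rw [if_neg hp]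
        exact ih

lemma filter_len_lt {α : Type} (l : List α) (p q : α → Bool) (c : α) (hc : c ∈ l)
    (hpc : p c = true) (hqc : ¬ q c = true) (himp : ∀ a, q a = true → p a = true) :
    (l.filter q).length < (l.filter p).length := by
  induction l with
  | nil => cases hc
  | cons a t ih =>
    simp only [List.filter_cons]
    rcases List.mem_cons.1 hc with rfl | hmem
    · rw [if_neg hqc, if_pos hpc]
      simp only [List.length_cons]
      have := filter_len_le t p q himp
      omega
    · by_cases hq : q a = true
      · simp only [hq, himp a hq, if_true, List.length_cons]
        have := ih hmem
        omega
      · rw [if_neg hq]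
        by_cases hp : p a = true
        · simp only [hp, if_true, List.length_cons]
          have := ih hmem
          omega
        · rw [if_neg hp]
          exact ih hmem

lemma freeN_mono {g pl pl'} (h : ∀ a, a ∈ pl → a ∈ pl') : freeN g pl' ≤ freeN g pl := by
  refine filter_len_le _ _ _ (fun a ha => ?_)
  simp only [decide_eq_true_eq] at ha ⊢
  exact fun hm => ha (h a hm)

lemma freeN_add_lt {g : List (List Char)} {pl : List (Int × Int)} {c : Int × Int}
    (hin : pvInB (pvW g) (pvH g) c.1 c.2 = true) (hc : c ∉ pl) :
    freeN g (pl ++ [c]) < freeN g pl := by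
  refine filter_len_lt _ _ _ c (mem_allCells.2 hin) (by simpa using hc)
    (by simp) (fun a ha => ?_)
  simp only [decide_eq_true_eq, List.mem_append] at ha ⊢
  exact fun hm => ha (Or.inl hm)

lemma badSum_split (g ty) {pl0 pl1 pl2 : List (Int × Int)} (h1 : pl1.Nodup) (h2 : pl2.Nodup)
    (s01 : ∀ c, c ∈ pl0 → c ∈ pl1) (s12 : ∀ c, c ∈ pl1 → c ∈ pl2) :
    badSum g ty (pl2.filter (fun c => decide (c ∉ pl0))) =
      badSum g ty (pl2.filter (fun c => decide (c ∉ pl1))) +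
      badSum g ty (pl1.filter (fun c => decide (c ∉ pl0))) := by
  have hperm : List.Perm (pl2.filter (fun c => decide (c ∉ pl0)))
      (pl2.filter (fun c => decide (c ∉ pl1)) ++ pl1.filter (fun c => decide (c ∉ pl0))) := by
    refine (List.perm_ext_iff_of_nodup (h2.filter _) ?_).2 (fun a => ?_)
    · refine (h2.filter _).append (h1.filter _) (fun a ha hb => ?_)
      simp only [List.mem_filter, decide_eq_true_eq] at ha hb
      exact ha.2 hb.1
    · simp only [List.mem_filter, List.mem_append, decide_eq_true_eq]
      by_cases hm : a ∈ pl1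
      · constructor
        · rintro ⟨_, h0⟩; exact Or.inr ⟨hm, h0⟩
        · rintro (⟨_, h1'⟩ | ⟨_, h0⟩); · exact absurd hm h1'
          · exact ⟨s12 a hm, h0⟩
      · constructor
        · rintro ⟨h2', h0⟩; exact Or.inl ⟨h2', hm⟩
        · rintro (⟨h2', _⟩ | ⟨hm', _⟩); · exact ⟨h2', fun h0 => hm (s01 a h0)⟩
          · exact absurd hm' hm
  unfold badSum
  rw [← List.sum_append, ← List.map_append]
  exact hperm.map _ |>.sum_eq

lemma nbrsOf_eq (cx cy : Int) :
    nbrsOf (cx, cy) = [(cx, cy - 1), (cx + 1, cy), (cx, cy + 1), (cx - 1, cy)] := by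
  simp only [nbrsOf, pvDeltas, List.map_cons, List.map_nil]
  norm_num [sub_eq_add_neg]

lemma good_parts {g ty cx cy} (h : goodC g ty (cx, cy) = true) :
    pvInB (pvW g) (pvH g) cx cy = true ∧ pvAt g cx cy = ty := by
  simpa [goodC, Bool.and_eq_true, beq_iff_eq] using h

lemma good_of_parts {g ty cx cy} (h1 : pvInB (pvW g) (pvH g) cx cy = true)
    (h2 : pvAt g cx cy = ty) : goodC g ty (cx, cy) = true := by
  simp [goodC, h1, h2]

lemma RegSt_plots (a : List (Int × Int)) (b c : Int) : (RegSt.mk a b c).plots = a := rfl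

-- the neighbour loop of scanPlots, as a named function (definitionally the foldl in the port)
def scanNbrs (fuel : Nat) (g : List (List Char)) (ty : Char) (x y : Int)
    (ds : List (Int × Int)) (st : RegSt) : RegSt :=
  ds.foldl (fun st d =>
    if PySem.Set.contains st.plots (x + d.1, y + d.2) then st
    else
      let r := scanPlots fuel g ty (x + d.1) (y + d.2) st
      let st2 := if r.1.1 then { r.2 with perim := r.2.perim + 1 } else r.2
      if r.1.2 then { st2 with sides := st2.sides + 1 } else st2) st

lemma scanNbrs_nil (fuel g ty x y st) : scanNbrs fuel g ty x y [] st = st := rfl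

lemma scanNbrs_cons (fuel g ty x y dx dy ds st) :
    scanNbrs fuel g ty x y ((dx, dy) :: ds) st = scanNbrs fuel g ty x y ds
      (if PySem.Set.contains st.plots (x + dx, y + dy) then st
       else
         let r := scanPlots fuel g ty (x + dx) (y + dy) st
         let st2 := if r.1.1 then { r.2 with perim := r.2.perim + 1 } else r.2
         if r.1.2 then { st2 with sides := st2.sides + 1 } else st2) := rfl

lemma scanPlots_good (fuel g ty x y st) (hb : pvInB (pvW g) (pvH g) x y = true)
    (ha : pvAt g x y = ty) :
    scanPlots (fuel + 1) g ty x y st = ((false, false),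
      scanNbrs fuel g ty x y pvDeltas { st with plots := PySem.Set.add st.plots (x, y) }) := by
  simp only [scanPlots]
  rw [if_neg (by simp [hb]), if_neg (by simp [ha])]
  rfl

-- the statement proved about one call of scanPlots at a given fuel
def ScanStmt (g : List (List Char)) (ty : Char) (fuel : Nat) : Prop :=
  ∀ (x y : Int) (st : RegSt), st.plots.Nodup → allGoodP g ty st.plots → (x, y) ∉ st.plots →
    1 + freeN g st.plots ≤ fuel →
    (scanPlots fuel g ty x y st).1 = (!(goodC g ty (x, y)), false) ∧
    (goodC g ty (x, y) = false → (scanPlots fuel g ty x y st).2 = st) ∧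
    (goodC g ty (x, y) = true →
      (scanPlots fuel g ty x y st).2.plots.Nodup ∧
      allGoodP g ty (scanPlots fuel g ty x y st).2.plots ∧
      (∀ c, c ∈ st.plots → c ∈ (scanPlots fuel g ty x y st).2.plots) ∧
      (x, y) ∈ (scanPlots fuel g ty x y st).2.plots ∧
      (∀ c, c ∈ (scanPlots fuel g ty x y st).2.plots → c ∉ st.plots →
        Conn g ty st.plots (x, y) c) ∧
      (∀ c, c ∈ (scanPlots fuel g ty x y st).2.plots → c ∉ st.plots →
        ∀ n ∈ nbrsOf c, goodC g ty n = true → n ∈ (scanPlots fuel g ty x y st).2.plots) ∧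
      (scanPlots fuel g ty x y st).2.perim =
        st.perim + badSum g ty ((scanPlots fuel g ty x y st).2.plots.filter (fun c => decide (c ∉ st.plots))) ∧
      (scanPlots fuel g ty x y st).2.sides = st.sides)

lemma nbrs_main (g : List (List Char)) (ty : Char) (f : Nat) (ihf : ScanStmt g ty f)
    (x y : Int) (base : List (Int × Int))
    (hgdxy : goodC g ty (x, y) = true) (hxyb : (x, y) ∉ base) :
    ∀ (ds : List (Int × Int)) (st : RegSt),
      st.plots.Nodup → allGoodP g ty st.plots →
      (x, y) ∈ st.plots →
      (∀ c, c ∈ base → c ∈ st.plots) →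
      1 + freeN g st.plots ≤ f →
      (∀ d ∈ ds, (x + d.1, y + d.2) ∈ nbrsOf (x, y)) →
      (scanNbrs f g ty x y ds st).plots.Nodup ∧
      allGoodP g ty (scanNbrs f g ty x y ds st).plots ∧
      (∀ c, c ∈ st.plots → c ∈ (scanNbrs f g ty x y ds st).plots) ∧
      (∀ c, c ∈ (scanNbrs f g ty x y ds st).plots → c ∉ st.plots →
        Conn g ty base (x, y) c) ∧
      (∀ c, c ∈ (scanNbrs f g ty x y ds st).plots → c ∉ st.plots →
        ∀ n ∈ nbrsOf c, goodC g ty n = true → n ∈ (scanNbrs f g ty x y ds st).plots) ∧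
      (∀ d ∈ ds, goodC g ty (x + d.1, y + d.2) = true →
        (x + d.1, y + d.2) ∈ (scanNbrs f g ty x y ds st).plots) ∧
      (scanNbrs f g ty x y ds st).perim = st.perim +
        (ds.map (fun d => if goodC g ty (x + d.1, y + d.2) = true then (0 : Int) else 1)).sum +
        badSum g ty ((scanNbrs f g ty x y ds st).plots.filter (fun c => decide (c ∉ st.plots))) ∧
      (scanNbrs f g ty x y ds st).sides = st.sides := by
  intro ds
  induction ds with
  | nil =>
    intro st hnd hgood hxy hbase hfl _
    rw [scanNbrs_nil]
    refine ⟨hnd, hgood, fun c hc => hc, fun c hc hnc => absurd hc hnc,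
      fun c hc hnc => absurd hc hnc, by simp, ?_, rfl⟩
    have hf : st.plots.filter (fun c => decide (c ∉ st.plots)) = [] :=
      List.filter_eq_nil_iff.2 (fun a ha => by simp [ha])
    simp only [badSum, hf, List.map_nil, List.sum_nil, add_zero]
  | cons d ds ih =>
    obtain ⟨dx, dy⟩ := d
    intro st hnd hgood hxy hbase hfl hds
    have hdhd : (x + dx, y + dy) ∈ nbrsOf (x, y) := hds _ (List.mem_cons_self ..)
    have hdtl : ∀ d ∈ ds, (x + d.1, y + d.2) ∈ nbrsOf (x, y) :=
      fun d hd => hds d (List.mem_cons_of_mem _ hd)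
    by_cases hcn : PySem.Set.contains st.plots (x + dx, y + dy) = true
    · -- neighbour already collected
      have hnmem : (x + dx, y + dy) ∈ st.plots := (PySem.Set.contains_iff _ _).1 hcn
      have hgn : goodC g ty (x + dx, y + dy) = true := hgood _ hnmem
      have hres : scanNbrs f g ty x y ((dx, dy) :: ds) st = scanNbrs f g ty x y ds st := by
        rw [scanNbrs_cons, if_pos hcn]
      rw [hres]
      obtain ⟨a1, a2, a3, a4, a5, a6, a7, a8⟩ := ih st hnd hgood hxy hbase hfl hdtl
      refine ⟨a1, a2, a3, a4, a5, fun d hd hg => ?_, ?_, a8⟩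
      · rcases List.mem_cons.1 hd with rfl | hd
        · exact a3 _ hnmem
        · exact a6 d hd hg
      · simp only [List.map_cons, List.sum_cons, hgn, if_true]
        omega
    · have hnmem : (x + dx, y + dy) ∉ st.plots := fun h => hcn ((PySem.Set.contains_iff _ _).2 h)
      obtain ⟨r1, r2, r3⟩ := ihf (x + dx) (y + dy) st hnd hgood hnmem hfl
      by_cases hgn : goodC g ty (x + dx, y + dy) = true
      · -- good neighbour: recursive scan collects its component
        have hr1 : (scanPlots f g ty (x + dx) (y + dy) st).1 = (false, false) := by
          rw [r1, hgn]; rfl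
        obtain ⟨b1, b2, b3, b4, b5, b6, b7, b8⟩ := r3 hgn
        have hres : scanNbrs f g ty x y ((dx, dy) :: ds) st =
            scanNbrs f g ty x y ds (scanPlots f g ty (x + dx) (y + dy) st).2 := by
          rw [scanNbrs_cons, if_neg (by simpa using hcn)]
          simp only [hr1]
          rfl
        rw [hres]
        set r2st := (scanPlots f g ty (x + dx) (y + dy) st).2 with hr2st
        obtain ⟨a1, a2, a3, a4, a5, a6, a7, a8⟩ := ih r2st b1 b2 (b3 _ hxy)
          (fun c hc => b3 _ (hbase c hc))
          (le_trans (by have := freeN_mono (g := g) b3; omega) hfl) hdtl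
        have hnb : (x + dx, y + dy) ∉ base := fun h => hnmem (hbase _ h)
        have hconn_n : Conn g ty base (x, y) (x + dx, y + dy) :=
          Conn.step (Conn.refl _ hgdxy hxyb) hdhd hgn hnb
        refine ⟨a1, a2, fun c hc => a3 _ (b3 _ hc), ?_, ?_, ?_, ?_, by rw [a8, b8]⟩
        · -- soundness
          intro c hc hnc
          by_cases hcr : c ∈ r2st.plots
          · exact conn_trans hconn_n (conn_weaken hbase (b5 c hcr hnc))
          · exact a4 c hc hcr
        · -- closure
          intro c hc hnc n hn hg
          by_cases hcr : c ∈ r2st.plots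
          · exact a3 _ (b6 c hcr hnc n hn hg)
          · exact a5 c hc hcr n hn hg
        · -- processed neighbours present
          intro d hd hg
          rcases List.mem_cons.1 hd with rfl | hd
          · exact a3 _ b4
          · exact a6 d hd hg
        · -- perimeter
          have hsplit := badSum_split g ty (pl0 := st.plots) (pl1 := r2st.plots)
            (pl2 := (scanNbrs f g ty x y ds r2st).plots) b1 a1 b3 a3
          simp only [List.map_cons, List.sum_cons, hgn, if_true]
          rw [a7, b7, hsplit]
          ring
      · -- bad neighbour: one unit of perimeter
        have hr1 : (scanPlots f g ty (x + dx) (y + dy) st).1 = (true, false) := by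
          rw [r1]
          simp [Bool.not_eq_true] at hgn
          rw [hgn]; rfl
        have hr2 : (scanPlots f g ty (x + dx) (y + dy) st).2 = st :=
          r2 (by simp [Bool.not_eq_true] at hgn; exact hgn)
        have hres : scanNbrs f g ty x y ((dx, dy) :: ds) st =
            scanNbrs f g ty x y ds ⟨st.plots, st.perim + 1, st.sides⟩ := by
          rw [scanNbrs_cons, if_neg (by simpa using hcn)]
          simp only [hr1, hr2]
          rfl
        rw [hres]
        obtain ⟨a1, a2, a3, a4, a5, a6, a7, a8⟩ := ih ⟨st.plots, st.perim + 1, st.sides⟩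
          hnd hgood hxy hbase hfl hdtl
        refine ⟨a1, a2, a3, a4, a5, fun d hd hg => ?_, ?_, a8⟩
        · rcases List.mem_cons.1 hd with rfl | hd
          · exact absurd hg hgn
          · exact a6 d hd hg
        · simp only [List.map_cons, List.sum_cons, if_neg hgn]
          rw [a7]
          ring

lemma scan_main (g ty) : ∀ fuel, ScanStmt g ty fuel := by
  intro fuel
  induction fuel with
  | zero =>
    intro x y st hnd hgood hxy hfl
    omega
  | succ f ihf =>
    intro x y st hnd hgood hxy hfl
    by_cases hb : pvInB (pvW g) (pvH g) x y = true
    · by_cases ha : pvAt g x y = ty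
      · -- good cell
        have hgd : goodC g ty (x, y) = true := good_of_parts hb ha
        have hadd : PySem.Set.add st.plots (x, y) = st.plots ++ [(x, y)] :=
          PySem.Set.add_of_not_mem hxy
        have hres : scanPlots (f + 1) g ty x y st =
            ((false, false), scanNbrs f g ty x y pvDeltas
              { st with plots := PySem.Set.add st.plots (x, y) }) :=
          scanPlots_good f g ty x y st hb ha
        rw [hres]
        set st1 : RegSt := { st with plots := PySem.Set.add st.plots (x, y) } with hst1
        have hst1p : st1.plots = st.plots ++ [(x, y)] := hadd
        have hsub1 : ∀ c, c ∈ st.plots → c ∈ st1.plots := by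
          intro c hc; rw [hst1p]; exact List.mem_append_left _ hc
        have hxy1 : (x, y) ∈ st1.plots := by rw [hst1p]; simp
        have hfree1 : freeN g st1.plots < freeN g st.plots := by
          rw [hst1p]; exact freeN_add_lt hb hxy
        obtain ⟨a1, a2, a3, a4, a5, a6, a7, a8⟩ :=
          nbrs_main g ty f ihf x y st.plots hgd hxy pvDeltas st1
            (by rw [hst1p, ← hadd]; exact PySem.Set.nodup_add _ _ hnd)
            (by
              intro c hc
              rw [hst1p] at hc
              rcases List.mem_append.1 hc with h | h
              · exact hgood c h
              · simp only [List.mem_singleton] at h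
                subst h
                exact hgd)
            hxy1 hsub1 (by omega)
            (fun d hd => List.mem_map.2 ⟨d, hd, rfl⟩)
        have hmem1 : ∀ c, c ∈ st1.plots ↔ c ∈ st.plots ∨ c = (x, y) := by
          intro c; rw [hst1p]; simp
        refine ⟨?_, ?_, fun _ => ?_⟩
        · rw [hgd]
          rfl
        · intro h
          rw [hgd] at h
          cases h
        refine ⟨a1, a2, fun c hc => a3 _ (hsub1 _ hc), a3 _ hxy1, ?_, ?_, ?_, by rw [a8]⟩
        · -- soundness
          intro c hc hnc
          by_cases hc1 : c ∈ st1.plots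
          · rcases (hmem1 c).1 hc1 with h | rfl
            · exact absurd h hnc
            · exact Conn.refl _ hgd hxy
          · exact a4 c hc hc1
        · -- closure
          intro c hc hnc n hn hg
          by_cases hc1 : c ∈ st1.plots
          · rcases (hmem1 c).1 hc1 with h | rfl
            · exact absurd h hnc
            · obtain ⟨d, hd, rfl⟩ := List.mem_map.1 hn
              exact a6 d hd hg
          · exact a5 c hc hc1 n hn hg
        · -- perimeter
          have hbadxy : badSum g ty (st1.plots.filter (fun c => decide (c ∉ st.plots))) =
              badC g ty (x, y) := by
            rw [hst1p, List.filter_append]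
            have hf1 : st.plots.filter (fun c => decide (c ∉ st.plots)) = [] :=
              List.filter_eq_nil_iff.2 (fun a ha => by simp [ha])
            have hf2 : [(x, y)].filter (fun c => decide (c ∉ st.plots)) = [(x, y)] := by
              simp [hxy]
            rw [hf1, hf2]
            simp [badSum]
          have hdelta : (pvDeltas.map (fun d =>
              if goodC g ty (x + d.1, y + d.2) = true then (0 : Int) else 1)).sum =
              badC g ty (x, y) := by
            simp only [badC, nbrsOf, List.map_map, Function.comp_def]
          have hsplit := badSum_split g ty (pl0 := st.plots) (pl1 := st1.plots)
            (pl2 := (scanNbrs f g ty x y pvDeltas st1).plots)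
            (by rw [hst1p, ← hadd]; exact PySem.Set.nodup_add _ _ hnd) a1 hsub1 a3
          rw [a7, hsplit, hbadxy, hdelta]
          have : st1.perim = st.perim := by rw [hst1]
          rw [this]
          ring
      · -- wrong type
        have hng : goodC g ty (x, y) = false := by
          simp [goodC, ha]
        have hres : scanPlots (f + 1) g ty x y st = ((true, false), st) := by
          simp only [scanPlots]
          rw [if_neg (by simp [hb]), if_pos (by simp [ha])]
        rw [hres, hng]
        exact ⟨rfl, fun _ => rfl, fun h => by cases h⟩
    · -- out of bounds
      have hng : goodC g ty (x, y) = false := by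
        simp [goodC, hb]
      have hres : scanPlots (f + 1) g ty x y st = ((true, false), st) := by
        simp only [scanPlots]
        rw [if_pos (by simp [hb])]
      rw [hres, hng]
      exact ⟨rfl, fun _ => rfl, fun h => by cases h⟩

-- B-side: one run of the stack loop
lemma fill_main (g ty) (s : Int × Int) :
    ∀ (fuel : Nat) (stack : List (Int × Int)) (cells : List (Int × Int)),
      cells.Nodup → allGoodP g ty cells →
      stack.length + 4 * freeN g cells ≤ fuel →
      (∀ c ∈ cells, Conn g ty [] s c) →
      (∀ c ∈ cells, ∀ n ∈ nbrsOf c, goodC g ty n = true → n ∈ cells ∨ n ∈ stack) →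
      (∀ c ∈ stack, c = s ∨ ∃ b ∈ cells, c ∈ nbrsOf b) →
      (fillLoop fuel g ty stack cells).Nodup ∧
      allGoodP g ty (fillLoop fuel g ty stack cells) ∧
      (∀ c ∈ cells, c ∈ fillLoop fuel g ty stack cells) ∧
      (∀ c ∈ fillLoop fuel g ty stack cells, Conn g ty [] s c) ∧
      (∀ c ∈ fillLoop fuel g ty stack cells, ∀ n ∈ nbrsOf c, goodC g ty n = true →
        n ∈ fillLoop fuel g ty stack cells) ∧
      (∀ c ∈ stack, goodC g ty c = true → c ∈ fillLoop fuel g ty stack cells) := by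
  intro fuel
  induction fuel with
  | zero =>
    intro stack cells hnd hgood hfl hS1 hS2 hStk
    have hstk0 : stack = [] := List.eq_nil_of_length_eq_zero (by omega)
    subst hstk0
    simp only [fillLoop]
    refine ⟨hnd, hgood, fun c hc => hc, hS1, fun c hc n hn hg => ?_, by simp⟩
    rcases hS2 c hc n hn hg with h | h
    · exact h
    · cases h
  | succ f ih =>
    intro stack cells hnd hgood hfl hS1 hS2 hStk
    match stack with
    | [] =>
      simp only [fillLoop]
      refine ⟨hnd, hgood, fun c hc => hc, hS1, fun c hc n hn hg => ?_, by simp⟩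
      rcases hS2 c hc n hn hg with h | h
      · exact h
      · cases h
    | (cx, cy) :: rest =>
      by_cases hc1 : PySem.Set.contains cells (cx, cy) = true
      · -- already collected: skip
        have hmem : (cx, cy) ∈ cells := (PySem.Set.contains_iff _ _).1 hc1
        have hres : fillLoop (f + 1) g ty ((cx, cy) :: rest) cells = fillLoop f g ty rest cells := by
          simp only [fillLoop, hc1, if_true]
        rw [hres]
        have hstep := ih rest cells hnd hgood (by simp at hfl ⊢; omega) hS1
          (fun c hc n hn hg => by
            rcases hS2 c hc n hn hg with h | h
            · exact Or.inl h
            · rcases List.mem_cons.1 h with rfl | h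
              · exact Or.inl hmem
              · exact Or.inr h)
          (fun c hc => hStk c (List.mem_cons_of_mem _ hc))
        obtain ⟨a1, a2, a3, a4, a5, a6⟩ := hstep
        refine ⟨a1, a2, a3, a4, a5, fun c hc hg => ?_⟩
        rcases List.mem_cons.1 hc with rfl | hc
        · exact a3 _ hmem
        · exact a6 c hc hg
      · have hnm : (cx, cy) ∉ cells := fun h => hc1 ((PySem.Set.contains_iff _ _).2 h)
        by_cases hb : pvInB (pvW g) (pvH g) cx cy = true
        · by_cases ha : pvAt g cx cy = ty
          · -- good new cell: collect it and push the four neighbours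
            have hgd : goodC g ty (cx, cy) = true := good_of_parts hb ha
            have hadd : PySem.Set.add cells (cx, cy) = cells ++ [(cx, cy)] :=
              PySem.Set.add_of_not_mem hnm
            have hres : fillLoop (f + 1) g ty ((cx, cy) :: rest) cells =
                fillLoop f g ty ((cx - 1, cy) :: (cx, cy + 1) :: (cx + 1, cy) :: (cx, cy - 1) :: rest)
                  (cells ++ [(cx, cy)]) := by
              simp only [fillLoop, hc1, hb, ha, hadd]
              simp
            rw [hres]
            have hmem' : ∀ a, a ∈ cells ++ [(cx, cy)] ↔ a ∈ cells ∨ a = (cx, cy) := by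
              intro a; simp
            have hstep := ih ((cx - 1, cy) :: (cx, cy + 1) :: (cx + 1, cy) :: (cx, cy - 1) :: rest)
              (cells ++ [(cx, cy)])
              (by rw [← hadd]; exact PySem.Set.nodup_add _ _ hnd)
              (by
                intro c hc
                rcases (hmem' c).1 hc with h | rfl
                · exact hgood c h
                · exact hgd)
              (by
                have hlt := freeN_add_lt (g := g) (pl := cells) (c := (cx, cy)) hb hnm
                simp only [List.length_cons] at hfl ⊢
                omega)
              (by
                intro c hc
                rcases (hmem' c).1 hc with h | rfl
                · exact hS1 c h
                · rcases hStk (cx, cy) (List.mem_cons_self ..) with rfl | ⟨b, hbm, hnb⟩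
                  · exact Conn.refl _ hgd (by simp)
                  · exact Conn.step (hS1 b hbm) hnb hgd (by simp))
              (by
                intro c hc n hn hg
                rcases (hmem' c).1 hc with h | rfl
                · rcases hS2 c h n hn hg with hh | hh
                  · exact Or.inl ((hmem' _).2 (Or.inl hh))
                  · rcases List.mem_cons.1 hh with rfl | hh
                    · exact Or.inl ((hmem' _).2 (Or.inr rfl))
                    · exact Or.inr (by simp [hh])
                · rw [nbrsOf_eq] at hn
                  simp only [List.mem_cons, List.not_mem_nil, or_false] at hn
                  rcases hn with rfl | rfl | rfl | rfl <;> exact Or.inr (by simp))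
              (by
                intro c hc
                simp only [List.mem_cons] at hc
                rcases hc with rfl | rfl | rfl | rfl | hc
                · exact Or.inr ⟨(cx, cy), (hmem' _).2 (Or.inr rfl), by rw [nbrsOf_eq]; simp⟩
                · exact Or.inr ⟨(cx, cy), (hmem' _).2 (Or.inr rfl), by rw [nbrsOf_eq]; simp⟩
                · exact Or.inr ⟨(cx, cy), (hmem' _).2 (Or.inr rfl), by rw [nbrsOf_eq]; simp⟩
                · exact Or.inr ⟨(cx, cy), (hmem' _).2 (Or.inr rfl), by rw [nbrsOf_eq]; simp⟩
                · rcases hStk c (List.mem_cons_of_mem _ hc) with rfl | ⟨b, hbm, hnb⟩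
                  · exact Or.inl rfl
                  · exact Or.inr ⟨b, (hmem' _).2 (Or.inl hbm), hnb⟩)
            obtain ⟨a1, a2, a3, a4, a5, a6⟩ := hstep
            refine ⟨a1, a2, fun c hc => a3 _ ((hmem' c).2 (Or.inl hc)), a4, a5, fun c hc hg => ?_⟩
            rcases List.mem_cons.1 hc with rfl | hc
            · exact a3 _ ((hmem' _).2 (Or.inr rfl))
            · exact a6 c (by simp [hc]) hg
          · -- wrong type: skip
            have hng : ¬ goodC g ty (cx, cy) = true := fun h => ha (good_parts h).2
            have hres : fillLoop (f + 1) g ty ((cx, cy) :: rest) cells = fillLoop f g ty rest cells := by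
              simp only [fillLoop, hc1, hb, ha]
              simp
            rw [hres]
            have hstep := ih rest cells hnd hgood (by simp at hfl ⊢; omega) hS1
              (fun c hc n hn hg => by
                rcases hS2 c hc n hn hg with h | h
                · exact Or.inl h
                · rcases List.mem_cons.1 h with rfl | h
                  · exact absurd hg hng
                  · exact Or.inr h)
              (fun c hc => hStk c (List.mem_cons_of_mem _ hc))
            obtain ⟨a1, a2, a3, a4, a5, a6⟩ := hstep
            refine ⟨a1, a2, a3, a4, a5, fun c hc hg => ?_⟩
            rcases List.mem_cons.1 hc with rfl | hc
            · exact absurd hg hng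
            · exact a6 c hc hg
        · -- out of bounds: skip
          have hng : ¬ goodC g ty (cx, cy) = true := fun h => hb (good_parts h).1
          have hres : fillLoop (f + 1) g ty ((cx, cy) :: rest) cells = fillLoop f g ty rest cells := by
            simp only [fillLoop, hc1, hb]
            simp
          rw [hres]
          have hstep := ih rest cells hnd hgood (by simp at hfl ⊢; omega) hS1
            (fun c hc n hn hg => by
              rcases hS2 c hc n hn hg with h | h
              · exact Or.inl h
              · rcases List.mem_cons.1 h with rfl | h
                · exact absurd hg hng
                · exact Or.inr h)
            (fun c hc => hStk c (List.mem_cons_of_mem _ hc))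
          obtain ⟨a1, a2, a3, a4, a5, a6⟩ := hstep
          refine ⟨a1, a2, a3, a4, a5, fun c hc hg => ?_⟩
          rcases List.mem_cons.1 hc with rfl | hc
          · exact absurd hg hng
          · exact a6 c hc hg

lemma perim_step (g : List (List Char)) (ty : Char) (acc nx ny : Int) :
    (if ¬ (pvInB (pvW g) (pvH g) nx ny = true) ∨ ¬ (pvAt g nx ny = ty) then acc + 1 else acc)
      = acc + (if goodC g ty (nx, ny) = true then 0 else 1) := by
  by_cases h1 : pvInB (pvW g) (pvH g) nx ny = true <;>
    by_cases h2 : pvAt g nx ny = ty <;>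
      simp [goodC, h1, h2, beq_iff_eq]

lemma perim_inner (g : List (List Char)) (ty : Char) (c : Int × Int) (acc : Int) :
    pvDeltas.foldl (fun acc d =>
      if ¬ (pvInB (pvW g) (pvH g) (c.1 + d.1) (c.2 + d.2) = true) ∨ ¬ (pvAt g (c.1 + d.1) (c.2 + d.2) = ty)
      then acc + 1 else acc) acc = acc + badC g ty c := by
  simp only [pvDeltas, List.foldl_cons, List.foldl_nil]
  rw [perim_step, perim_step, perim_step, perim_step]
  simp only [badC, nbrsOf, pvDeltas, List.map_cons, List.map_nil, List.sum_cons, List.sum_nil]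
  ring

lemma perimOf_eq (g ty) (l : List (Int × Int)) : perimOf g ty l = badSum g ty l := by
  suffices h : ∀ (l : List (Int × Int)) (acc : Int), l.foldl (fun acc c =>
      pvDeltas.foldl (fun acc d =>
        if ¬ (pvInB (pvW g) (pvH g) (c.1 + d.1) (c.2 + d.2) = true) ∨ ¬ (pvAt g (c.1 + d.1) (c.2 + d.2) = ty)
        then acc + 1 else acc) acc) acc = acc + badSum g ty l by
    simpa [perimOf] using h l 0
  intro l
  induction l with
  | nil => intro acc; simp [badSum]
  | cons a t ih =>
    intro acc
    simp only [List.foldl_cons]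
    rw [perim_inner, ih]
    simp [badSum]
    ring

-- relation maintained between A's and B's loop states
def RelAB (_g : List (List Char)) (a : List (List (Int × Int)) × Int × Int)
    (b : List (Int × Int) × Int) : Prop :=
  (∀ c : Int × Int, (∃ R ∈ a.1, c ∈ R) ↔ c ∈ b.1) ∧ a.2.1 = b.2 ∧ a.2.2 = 0

lemma foldl_rel {α β γ : Type} (R : α → β → Prop) (f : α → γ → α) (h : β → γ → β)
    (l : List γ) : ∀ (a : α) (b : β), R a b →
    (∀ a b c, c ∈ l → R a b → R (f a c) (h b c)) → R (l.foldl f a) (l.foldl h b) := by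
  induction l with
  | nil => intro a b hR _; exact hR
  | cons x xs ih =>
    intro a b hR hstep
    exact ih _ _ (hstep _ _ _ (List.mem_cons_self ..) hR)
      (fun a b c hc => hstep a b c (List.mem_cons_of_mem _ hc))

lemma body_rel (g : List (List Char)) (x y : Int) (hx0 : 0 ≤ x) (hx : x < pvW g)
    (hy0 : 0 ≤ y) (hy : y < pvH g) (a b) (hR : RelAB g a b) :
    RelAB g (bodyA g a x y) (bodyB g b x y) := by
  obtain ⟨hmem, hsum, hzero⟩ := hR
  by_cases hv : (x, y) ∈ b.1
  · -- both sides skip an already-covered cell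
    have hA : (a.1.any (fun R => PySem.Set.contains R (x, y))) = true := by
      rcases (hmem (x, y)).2 hv with ⟨R, hRm, hRc⟩
      exact List.any_eq_true.2 ⟨R, hRm, (PySem.Set.contains_iff _ _).2 hRc⟩
    have hB : PySem.Set.contains b.1 (x, y) = true := (PySem.Set.contains_iff _ _).2 hv
    simp only [bodyA, bodyB, hA, hB, if_true]
    exact ⟨hmem, hsum, hzero⟩
  · -- fresh cell: both sides collect the same region
    have hA : (a.1.any (fun R => PySem.Set.contains R (x, y))) = false := by
      rw [Bool.eq_false_iff]
      intro h
      rcases List.any_eq_true.1 h with ⟨R, hRm, hRc⟩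
      exact hv ((hmem (x, y)).1 ⟨R, hRm, (PySem.Set.contains_iff _ _).1 hRc⟩)
    have hB : PySem.Set.contains b.1 (x, y) = false := by
      rw [Bool.eq_false_iff]
      exact fun h => hv ((PySem.Set.contains_iff _ _).1 h)
    have hgd : goodC g (pvAt g x y) (x, y) = true :=
      good_of_parts (by simp only [pvInB, Bool.and_eq_true, decide_eq_true_eq]; omega) rfl
    have hfree0 : freeN g PySem.Set.empty = g.length * (pvW g).toNat := by
      rw [freeN, List.filter_eq_self.2 (fun c _ => by simp [PySem.Set.empty])]
      exact length_allCells g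
    -- A's recursive scan
    obtain ⟨r1, r2, r3⟩ := scan_main g (pvAt g x y) ((pvW g).toNat * (pvH g).toNat + 1) x y
      ⟨PySem.Set.empty, 0, 0⟩ List.nodup_nil (fun c hc => (List.not_mem_nil hc).elim)
      (fun h => List.not_mem_nil h)
      (by
        rw [RegSt_plots, hfree0]
        simp only [pvH, Int.toNat_natCast]
        rw [Nat.mul_comm g.length]
        omega)
    obtain ⟨p1, p2, p3, p4, p5, p6, p7, p8⟩ := r3 hgd
    set P := (scanPlots ((pvW g).toNat * (pvH g).toNat + 1) g (pvAt g x y) x y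
      ⟨PySem.Set.empty, 0, 0⟩).2 with hP
    have hmemP : ∀ c, c ∈ P.plots ↔ Conn g (pvAt g x y) [] (x, y) c := by
      intro c
      constructor
      · intro hc
        exact p5 c hc (fun h => List.not_mem_nil h)
      · exact conn_complete (fun c hc hnc => p6 c hc hnc) p4 c
    have hperimP : P.perim = badSum g (pvAt g x y) P.plots := by
      have : P.plots.filter (fun c => decide (c ∉ (⟨PySem.Set.empty, 0, 0⟩ : RegSt).plots)) =
          P.plots := List.filter_eq_self.2 (fun c _ => by simp [PySem.Set.empty])
      rw [p7, this]
      simp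
    -- B's stack fill
    obtain ⟨q1, q2, q3, q4, q5, q6⟩ := fill_main g (pvAt g x y) (x, y)
      (4 * ((pvW g).toNat * (pvH g).toNat) + 1) [(x, y)] PySem.Set.empty
      List.nodup_nil (fun c hc => (List.not_mem_nil hc).elim)
      (by
        rw [hfree0]
        simp only [pvH, Int.toNat_natCast, List.length_cons, List.length_nil]
        rw [Nat.mul_comm g.length]
        omega)
      (fun c hc => (List.not_mem_nil hc).elim)
      (fun c hc => (List.not_mem_nil hc).elim)
      (fun c hc => Or.inl (by simpa using hc))
    set C := fillLoop (4 * ((pvW g).toNat * (pvH g).toNat) + 1) g (pvAt g x y) [(x, y)]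
      PySem.Set.empty with hC
    have hmemC : ∀ c, c ∈ C ↔ Conn g (pvAt g x y) [] (x, y) c := by
      intro c
      constructor
      · exact q4 c
      · exact conn_complete (fun c hc _ => q5 c hc) (q6 (x, y) (by simp) hgd) c
    have hperm : List.Perm P.plots C :=
      (List.perm_ext_iff_of_nodup p1 q1).2 (fun c => (hmemP c).trans (hmemC c).symm)
    have hlen : P.plots.length = C.length := hperm.length_eq
    have hbad : badSum g (pvAt g x y) P.plots = badSum g (pvAt g x y) C :=
      (hperm.map _).sum_eq
    simp only [bodyA, bodyB, hA, hB, Bool.false_eq_true, if_false, ← hP, ← hC]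
    refine ⟨?_, ?_, ?_⟩
    · intro c
      simp only [List.mem_cons, PySem.Set.mem_union]
      constructor
      · rintro ⟨R, hRm, hRc⟩
        rcases hRm with rfl | hRm
        · exact Or.inr ((hmemC c).2 ((hmemP c).1 hRc))
        · exact Or.inl ((hmem c).1 ⟨R, hRm, hRc⟩)
      · rintro (h | h)
        · rcases (hmem c).2 h with ⟨R, hRm, hRc⟩
          exact ⟨R, Or.inr hRm, hRc⟩
        · exact ⟨P.plots, Or.inl rfl, (hmemP c).2 ((hmemC c).1 h)⟩
    · simp only [hsum, hlen, hperimP, hbad, perimOf_eq]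
    · simp only [hzero, p8, mul_zero, add_zero]

-- ===== VERDICT (by name: the statement is the Claim_ definition above) =====
theorem get_region_data_spec : Claim_equal_get_region_data := by
  intro region_map _ _
  unfold Spec_get_region_data get_region_data get_region_data_alt
  have h := foldl_rel (RelAB (pvGrid region_map))
    (fun acc y => (PySem.List.pyRange 0 (pvW (pvGrid region_map)) 1).foldl
      (fun acc x => bodyA (pvGrid region_map) acc x y) acc)
    (fun acc y => (PySem.List.pyRange 0 (pvW (pvGrid region_map)) 1).foldl
      (fun acc x => bodyB (pvGrid region_map) acc x y) acc)
    (PySem.List.pyRange 0 (pvH (pvGrid region_map)) 1) ([], 0, 0) ([], 0)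
    (by refine ⟨fun c => ?_, rfl, rfl⟩; simp)
    (by
      intro a b yv hyv hab
      have hy := (PySem.List.mem_pyRange_one).1 hyv
      exact foldl_rel _ _ _ _ a b hab (by
        intro a b xv hxv hab
        have hx := (PySem.List.mem_pyRange_one).1 hxv
        exact body_rel _ _ _ hx.1 hx.2 hy.1 hy.2 _ _ hab))
  obtain ⟨-, h2, h3⟩ := h
  simp only [h2, h3]
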